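-- pv_equiv track=rewrite | github.com/Chris91ss/UBB-FMI-Computer_Science | First year/Second Semester/Graphs/Practice/Problems/2018_sample_no9.py | count_shortest_paths
-- ===== SOURCE A (Python) =====
-- from collections import deque, defaultdict
--
-- def count_shortest_paths(graph, s, t):
--     # Initialize the queue for BFS with the starting vertex s
--     Q = deque([s])
--
--     # Dictionary to store the shortest distance from s to each vertex
--     distance = defaultdict(lambda: float('inf'))
--     distance[s] = 0  # Distance to the starting vertex is 0
--
--     # Dictionary to store the number of shortest paths to each vertex
--     count = defaultdict(int)
--     count[s] = 1  # There is one path to the starting vertex (itself)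
--
--     # Perform BFS
--     while Q:
--         # Dequeue a vertex from the queue
--         u = Q.popleft()
--
--         # Explore all neighbors of u
--         for v in graph[u]:
--             # If v is being visited for the first time
--             if distance[v] == float('inf'):
--                 distance[v] = distance[u] + 1  # Update the distance to v
--                 Q.append(v)  # Enqueue v for further exploration
--
--             # If v is reachable via a shortest path through u
--             if distance[v] == distance[u] + 1:
--                 count[v] += count[u]  # Increment the count of shortest paths to v
--
--     # Return the number of shortest paths from s to t
--     return count[t]
-- ===== SOURCE B (Python) =====
-- from collections import deque, defaultdict
--
-- # Two-pass rewrite: plain BFS first (distances + dequeue order only), then a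
-- # second pass over the recorded order accumulates the path counts.
-- def count_shortest_paths(graph, s, t):
--     distance = {s: 0}
--     order = []
--     Q = deque([s])
--     while Q:
--         u = Q.popleft()
--         order.append(u)
--         for v in graph[u]:
--             if v not in distance:
--                 distance[v] = distance[u] + 1
--                 Q.append(v)
--     count = defaultdict(int)
--     count[s] = 1
--     for u in order:
--         du1 = distance[u] + 1
--         for v in graph[u]:
--             if distance.get(v) == du1:
--                 count[v] += count[u]
--     return count[t]
-- ===== Notes on version B (the rewrite author's own statement) =====
-- stated objective: alternative
-- what changed: A computes shortest-path counts inside the BFS loop, interleaving distance and count updates; B decomposes it into a plain BFS that records only distances and dequeue order, followed by a separate counting pass that replays that order.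
import Mathlib
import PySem

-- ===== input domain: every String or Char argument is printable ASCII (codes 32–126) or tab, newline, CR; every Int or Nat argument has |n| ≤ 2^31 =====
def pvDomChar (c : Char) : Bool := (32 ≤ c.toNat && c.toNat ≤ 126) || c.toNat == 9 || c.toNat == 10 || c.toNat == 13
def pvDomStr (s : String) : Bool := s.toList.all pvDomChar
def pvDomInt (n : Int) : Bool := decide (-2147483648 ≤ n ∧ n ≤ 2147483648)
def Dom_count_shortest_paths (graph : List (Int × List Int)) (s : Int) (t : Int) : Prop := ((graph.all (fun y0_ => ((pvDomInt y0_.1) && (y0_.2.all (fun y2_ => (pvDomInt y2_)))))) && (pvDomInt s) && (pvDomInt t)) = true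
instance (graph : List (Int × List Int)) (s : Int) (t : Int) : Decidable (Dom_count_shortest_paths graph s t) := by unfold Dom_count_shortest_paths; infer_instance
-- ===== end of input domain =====

-- B replaces A's single BFS that interleaves distance and count updates by two passes:
-- a plain BFS recording only distances and dequeue order, then a separate counting pass
-- replaying that order (objective: alternative decomposition, same cost).

-- ===== PORT A =====
-- graph[u]; a missing key is a Python KeyError, excluded by Pre_ (both Pythons raise there)
def pvAdj (graph : List (Int × List Int)) (u : Int) : List Int :=
  ((PySem.Dict.ofList graph).get? u).getD []

-- body of A's inner 'for v in graph[u]' loop; distance is a Dict where a missing key means inf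
def pvStepA (u : Int) (st : List Int × PySem.Dict Int Int × PySem.Dict Int Int) (v : Int) :
    List Int × PySem.Dict Int Int × PySem.Dict Int Int :=
  let Q := st.1; let dist := st.2.1; let cnt := st.2.2
  -- if distance[v] == float('inf'): distance[v] = distance[u] + 1; Q.append(v)
  -- (distance[u] is always a set key when u comes off the queue, so getD 0 is exact)
  let p := if (dist.get? v).isNone then (Q ++ [v], dist.insert v (dist.getD u 0 + 1)) else (Q, dist)
  -- if distance[v] == distance[u] + 1: count[v] += count[u]
  let cnt' := if p.2.get? v = some (p.2.getD u 0 + 1) then cnt.insert v (cnt.getD v 0 + cnt.getD u 0) else cnt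
  (p.1, p.2, cnt')

-- A's 'while Q' loop; the fuel only totalizes the same computation (pops ≤ 1 + total listed edges)
def pvLoopA (graph : List (Int × List Int)) :
    Nat → List Int → PySem.Dict Int Int → PySem.Dict Int Int → PySem.Dict Int Int
  | 0, _, _, cnt => cnt
  | _ + 1, [], _, cnt => cnt
  | fuel + 1, u :: Q, dist, cnt =>
    let st := (pvAdj graph u).foldl (pvStepA u) (Q, dist, cnt)
    pvLoopA graph fuel st.1 st.2.1 st.2.2

def pvFuel (graph : List (Int × List Int)) : Nat :=
  2 + graph.length + (graph.map (fun p => p.2.length)).sum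

def count_shortest_paths (graph : List (Int × List Int)) (s : Int) (t : Int) : Int :=
  (pvLoopA graph (pvFuel graph) [s] (PySem.Dict.empty.insert s 0) (PySem.Dict.empty.insert s 1)).getD t 0

-- ===== PORT B =====
-- body of B's BFS inner loop: only (queue, distance)
def pvStepB (u : Int) (st : List Int × PySem.Dict Int Int) (v : Int) : List Int × PySem.Dict Int Int :=
  if st.2.contains v then st else (st.1 ++ [v], st.2.insert v (st.2.getD u 0 + 1))

-- B's pass 1: plain BFS recording distances and the dequeue order (same totalizing fuel guard)
def pvBfsB (graph : List (Int × List Int)) :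
    Nat → List Int → PySem.Dict Int Int → List Int → List Int × PySem.Dict Int Int
  | 0, _, dist, ord => (ord, dist)
  | _ + 1, [], dist, ord => (ord, dist)
  | fuel + 1, u :: Q, dist, ord =>
    let st := (pvAdj graph u).foldl (pvStepB u) (Q, dist)
    pvBfsB graph fuel st.1 st.2 (ord ++ [u])

def count_shortest_paths_alt (graph : List (Int × List Int)) (s : Int) (t : Int) : Int :=
  let r := pvBfsB graph (pvFuel graph) [s] (PySem.Dict.empty.insert s 0) []
  -- pass 2: count[s] = 1; replay the recorded order against the final distances
  let cnt := r.1.foldl (fun cnt u =>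
      let du1 := r.2.getD u 0 + 1
      (pvAdj graph u).foldl (fun (cnt : PySem.Dict Int Int) v =>
        if r.2.get? v = some du1 then cnt.insert v (cnt.getD v 0 + cnt.getD u 0) else cnt) cnt)
    (PySem.Dict.empty.insert s 1)
  cnt.getD t 0

-- ===== PRECONDITION & SPEC =====
-- vertices reachable from s (expanding only through keys); graph.length + 1 rounds reach the fixpoint
def pvReach (graph : List (Int × List Int)) (s : Int) : Nat → List Int
  | 0 => [s]
  | n + 1 => let R := pvReach graph s n; (R ++ R.flatMap (pvAdj graph)).dedup

-- Pre_ holds exactly when every vertex the BFS dequeues is a key of graph, i.e. exactly when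
-- the Python A returns normally (on a reachable missing key it raises KeyError, as does B).
def Pre_count_shortest_paths (graph : List (Int × List Int)) (s : Int) (t : Int) : Prop :=
  ∀ v ∈ pvReach graph s (graph.length + 1), ((PySem.Dict.ofList graph).get? v).isSome = true
instance (graph : List (Int × List Int)) (s : Int) (t : Int) : Decidable (Pre_count_shortest_paths graph s t) := by unfold Pre_count_shortest_paths; infer_instance

def pvWitness_count_shortest_paths : (List (Int × List Int)) × Int × Int := ([(0, [1]), (1, [])], 0, 1)

def Spec_count_shortest_paths (graph : List (Int × List Int)) (s : Int) (t : Int) (out : Int) : Prop := out = count_shortest_paths_alt graph s t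
instance (graph : List (Int × List Int)) (s : Int) (t : Int) (out : Int) : Decidable (Spec_count_shortest_paths graph s t out) := by unfold Spec_count_shortest_paths; infer_instance

-- ===== CLAIM (what is proved, stated in full; the proofs are below) =====
def Claim_equal_count_shortest_paths : Prop := ∀ (graph : List (Int × List Int)) (s : Int) (t : Int), Dom_count_shortest_paths graph s t → Pre_count_shortest_paths graph s t → Spec_count_shortest_paths graph s t (count_shortest_paths graph s t)

-- ===== LEMMAS AND PROOFS =====

-- B's pass 2 as a named function (definitionally the fold inside count_shortest_paths_alt)
def pvPass2 (graph : List (Int × List Int)) (dF : PySem.Dict Int Int) (ord : List Int)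
    (cnt : PySem.Dict Int Int) : PySem.Dict Int Int :=
  ord.foldl (fun cnt u =>
    (pvAdj graph u).foldl (fun (cnt : PySem.Dict Int Int) v =>
      if dF.get? v = some (dF.getD u 0 + 1) then cnt.insert v (cnt.getD v 0 + cnt.getD u 0) else cnt) cnt) cnt

-- d' extends d: every binding of d is still in d'
def pvExt (d d' : PySem.Dict Int Int) : Prop := ∀ k v, d.get? k = some v → d'.get? k = some v

theorem pvExt_refl (d : PySem.Dict Int Int) : pvExt d d := fun _ _ h => h

theorem pvExt_trans {a b c : PySem.Dict Int Int} (h1 : pvExt a b) (h2 : pvExt b c) : pvExt a c :=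
  fun k v h => h2 k v (h1 k v h)

theorem pvExt_stepB (u v : Int) (st : List Int × PySem.Dict Int Int) :
    pvExt st.2 (pvStepB u st v).2 := by
  unfold pvStepB
  split
  · exact pvExt_refl _
  · intro k w hk
    rename_i hc
    have hne : k ≠ v := by
      intro h; subst h
      rw [PySem.Dict.contains_eq_isSome_get?, hk] at hc
      simp at hc
    simpa [PySem.Dict.get?_insert_of_ne _ _ hne] using hk

theorem pvExt_foldB (u : Int) (l : List Int) (st : List Int × PySem.Dict Int Int) :
    pvExt st.2 (l.foldl (pvStepB u) st).2 := by
  induction l generalizing st with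
  | nil => exact pvExt_refl _
  | cons v l ih => exact pvExt_trans (pvExt_stepB u v st) (ih _)

theorem pvExt_bfs (graph : List (Int × List Int)) (fuel : Nat) (Q : List Int)
    (dist : PySem.Dict Int Int) (ord : List Int) :
    pvExt dist (pvBfsB graph fuel Q dist ord).2 := by
  induction fuel generalizing Q dist ord with
  | zero => exact pvExt_refl _
  | succ fuel ih =>
    cases Q with
    | nil => exact pvExt_refl _
    | cons u Q =>
      exact pvExt_trans (pvExt_foldB u (pvAdj graph u) (Q, dist)) (ih _ _ _)

-- queue invariant: everything on the queue has a distance entry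
theorem pvInv_foldB (u : Int) (l : List Int) (st : List Int × PySem.Dict Int Int)
    (hQ : ∀ x ∈ st.1, ((st.2.get? x).isSome : Prop)) :
    ∀ x ∈ (l.foldl (pvStepB u) st).1, (((l.foldl (pvStepB u) st).2).get? x).isSome := by
  induction l generalizing st with
  | nil => exact hQ
  | cons v l ih =>
    simp only [List.foldl_cons]
    apply ih
    intro x hx
    by_cases hc : st.2.contains v = true
    · have hx' : x ∈ st.1 := by simpa [pvStepB, hc] using hx
      simpa [pvStepB, hc] using hQ x hx'
    · have hx' : x ∈ st.1 ∨ x = v := by simpa [pvStepB, hc] using hx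
      rcases hx' with hx' | hx'
      · obtain ⟨w, hw⟩ := Option.isSome_iff_exists.1 (hQ x hx')
        have := pvExt_stepB u v st x w hw
        simp [this]
      · subst hx'
        simp [pvStepB, hc, PySem.Dict.get?_insert_self]

-- the (queue, distance) components of one step of A's inner fold equal one step of B's
theorem pvStep_proj (u v : Int) (Q : List Int) (dist cnt : PySem.Dict Int Int) :
    ((pvStepA u (Q, dist, cnt) v).1, (pvStepA u (Q, dist, cnt) v).2.1) = pvStepB u (Q, dist) v := by
  unfold pvStepA pvStepB
  cases hdv : dist.get? v with
  | none => simp [PySem.Dict.contains_eq_isSome_get?, hdv]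
  | some z => simp [PySem.Dict.contains_eq_isSome_get?, hdv]

-- key lemma: A's count updates over graph[u] are the pass-2 updates read off ANY distance
-- dict dF extending the inner fold's result (a distance never changes once it is set)
theorem pvCnt_fold (u : Int) (l : List Int) (Q : List Int) (dist cnt dF : PySem.Dict Int Int)
    (hu : ((dist.get? u).isSome : Prop))
    (hF : pvExt (l.foldl (pvStepB u) (Q, dist)).2 dF) :
    (l.foldl (pvStepA u) (Q, dist, cnt)).2.2
      = l.foldl (fun cnt v => if dF.get? v = some (dF.getD u 0 + 1)
          then cnt.insert v (cnt.getD v 0 + cnt.getD u 0) else cnt) cnt := by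
  induction l generalizing Q dist cnt with
  | nil => rfl
  | cons v l ih =>
    obtain ⟨w, hw⟩ := Option.isSome_iff_exists.1 hu
    simp only [List.foldl_cons] at hF ⊢
    have hproj := pvStep_proj u v Q dist cnt
    have hext1 : pvExt (pvStepB u (Q, dist) v).2 dF :=
      pvExt_trans (pvExt_foldB u l (pvStepB u (Q, dist) v)) hF
    have hdist_ext : pvExt dist dF := pvExt_trans (pvExt_stepB u v (Q, dist)) hext1
    have hFu : dF.get? u = some w := hdist_ext u w hw
    have hFuD : dF.getD u 0 = w := PySem.Dict.getD_of_get?_eq_some _ _ hFu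
    have huD : dist.getD u 0 = w := PySem.Dict.getD_of_get?_eq_some _ _ hw
    -- the head count update coincides
    have hhead : (pvStepA u (Q, dist, cnt) v).2.2
        = if dF.get? v = some (dF.getD u 0 + 1)
          then cnt.insert v (cnt.getD v 0 + cnt.getD u 0) else cnt := by
      unfold pvStepA
      cases hdv : dist.get? v with
      | none =>
        -- fresh vertex: both conditions are true
        have hvdF : dF.get? v = some (w + 1) := by
          have h1 : (pvStepB u (Q, dist) v).2.get? v = some (dist.getD u 0 + 1) := by
            unfold pvStepB
            have hc : dist.contains v = false := by
              rw [PySem.Dict.contains_eq_isSome_get?, hdv]; rfl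
            simp [hc, PySem.Dict.get?_insert_self]
          have h2 := hext1 v _ h1
          rwa [huD] at h2
        have hne : u ≠ v := by
          intro h; subst h; rw [hw] at hdv; simp at hdv
        have hins : (dist.insert v (w + 1)).getD u 0 = w := by
          rw [PySem.Dict.getD_insert_of_ne dist _ _ hne, huD]
        simp [hdv, hvdF, hFuD, PySem.Dict.get?_insert_self, hins, huD]
      | some z =>
        -- already-seen vertex: both sides compare the same stored distance
        have hvdF : dF.get? v = some z := hdist_ext v z hdv
        simp [hdv, hvdF, hFuD, huD]
    -- rewrite the tail using the projection equality and the induction hypothesis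
    have hu' : (((pvStepB u (Q, dist) v).2.get? u).isSome : Prop) := by
      have := pvExt_stepB u v (Q, dist) u w hw
      simp [this]
    have ihx := ih (pvStepB u (Q, dist) v).1 (pvStepB u (Q, dist) v).2
      (pvStepA u (Q, dist, cnt) v).2.2 hu' (by simpa using hF)
    calc (l.foldl (pvStepA u) (pvStepA u (Q, dist, cnt) v)).2.2
        = (l.foldl (pvStepA u)
            ((pvStepB u (Q, dist) v).1, (pvStepB u (Q, dist) v).2,
              (pvStepA u (Q, dist, cnt) v).2.2)).2.2 := by rw [← hproj]
      _ = l.foldl (fun cnt v => if dF.get? v = some (dF.getD u 0 + 1)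
            then cnt.insert v (cnt.getD v 0 + cnt.getD u 0) else cnt)
            (pvStepA u (Q, dist, cnt) v).2.2 := ihx
      _ = _ := by rw [hhead]

-- A's whole inner fold projects onto B's
theorem pvFold_proj (u : Int) (l : List Int) (Q : List Int) (dist cnt : PySem.Dict Int Int) :
    ((l.foldl (pvStepA u) (Q, dist, cnt)).1, (l.foldl (pvStepA u) (Q, dist, cnt)).2.1)
      = l.foldl (pvStepB u) (Q, dist) := by
  induction l generalizing Q dist cnt with
  | nil => rfl
  | cons v l ih =>
    simp only [List.foldl_cons]
    rw [← pvStep_proj u v Q dist cnt]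
    exact ih _ _ _

-- the order accumulator of B's BFS prepends; the final distances ignore it
theorem pvBfs_ord (graph : List (Int × List Int)) (fuel : Nat) :
    ∀ (Q : List Int) (dist : PySem.Dict Int Int) (ord : List Int),
      pvBfsB graph fuel Q dist ord
        = (ord ++ (pvBfsB graph fuel Q dist []).1, (pvBfsB graph fuel Q dist []).2) := by
  induction fuel with
  | zero => intro Q dist ord; simp [pvBfsB]
  | succ fuel ih =>
    intro Q dist ord
    cases Q with
    | nil => simp [pvBfsB]
    | cons u Q =>
      show pvBfsB graph fuel _ _ (ord ++ [u]) = _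
      rw [ih _ _ (ord ++ [u])]
      conv_rhs => rw [show pvBfsB graph (fuel + 1) (u :: Q) dist []
        = pvBfsB graph fuel ((pvAdj graph u).foldl (pvStepB u) (Q, dist)).1
            ((pvAdj graph u).foldl (pvStepB u) (Q, dist)).2 ([] ++ [u]) from rfl]
      rw [ih _ _ ([] ++ [u])]
      simp

-- pass 2 over (u :: ord) peels off u's edge updates
theorem pvPass2_cons (graph : List (Int × List Int)) (dF : PySem.Dict Int Int)
    (u : Int) (ord : List Int) (cnt : PySem.Dict Int Int) :
    pvPass2 graph dF (u :: ord) cnt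
      = pvPass2 graph dF ord ((pvAdj graph u).foldl (fun (cnt : PySem.Dict Int Int) v =>
          if dF.get? v = some (dF.getD u 0 + 1)
          then cnt.insert v (cnt.getD v 0 + cnt.getD u 0) else cnt) cnt) := rfl

-- main simulation: A's loop equals pass 2 replayed over B's recorded order and final distances
theorem pvMain (graph : List (Int × List Int)) (fuel : Nat) :
    ∀ (Q : List Int) (dist cnt : PySem.Dict Int Int),
      (∀ x ∈ Q, ((dist.get? x).isSome : Prop)) →
      pvLoopA graph fuel Q dist cnt
        = pvPass2 graph (pvBfsB graph fuel Q dist []).2 (pvBfsB graph fuel Q dist []).1 cnt := by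
  induction fuel with
  | zero => intro Q dist cnt _; rfl
  | succ fuel ih =>
    intro Q dist cnt hQ
    cases Q with
    | nil => rfl
    | cons u Q =>
      have hu : ((dist.get? u).isSome : Prop) := hQ u (by simp)
      have hproj := pvFold_proj u (pvAdj graph u) Q dist cnt
      have h1 : (List.foldl (pvStepA u) (Q, dist, cnt) (pvAdj graph u)).1
          = (List.foldl (pvStepB u) (Q, dist) (pvAdj graph u)).1 := congrArg Prod.fst hproj
      have h2 : (List.foldl (pvStepA u) (Q, dist, cnt) (pvAdj graph u)).2.1
          = (List.foldl (pvStepB u) (Q, dist) (pvAdj graph u)).2 := congrArg Prod.snd hproj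
      have hinv : ∀ x ∈ (List.foldl (pvStepB u) (Q, dist) (pvAdj graph u)).1,
          (((List.foldl (pvStepB u) (Q, dist) (pvAdj graph u)).2.get? x).isSome : Prop) :=
        pvInv_foldB u (pvAdj graph u) (Q, dist) (fun x hx => hQ x (List.mem_cons_of_mem _ hx))
      have hcnt := pvCnt_fold u (pvAdj graph u) Q dist cnt
        (pvBfsB graph fuel (List.foldl (pvStepB u) (Q, dist) (pvAdj graph u)).1
          (List.foldl (pvStepB u) (Q, dist) (pvAdj graph u)).2 []).2 hu
        (pvExt_bfs graph fuel _ _ [])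
      rw [show pvLoopA graph (fuel + 1) (u :: Q) dist cnt
          = pvLoopA graph fuel (List.foldl (pvStepA u) (Q, dist, cnt) (pvAdj graph u)).1
              (List.foldl (pvStepA u) (Q, dist, cnt) (pvAdj graph u)).2.1
              (List.foldl (pvStepA u) (Q, dist, cnt) (pvAdj graph u)).2.2 from rfl,
        h1, h2,
        show pvBfsB graph (fuel + 1) (u :: Q) dist []
          = pvBfsB graph fuel (List.foldl (pvStepB u) (Q, dist) (pvAdj graph u)).1
              (List.foldl (pvStepB u) (Q, dist) (pvAdj graph u)).2 ([] ++ [u]) from rfl,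
        pvBfs_ord graph fuel _ _ ([] ++ [u])]
      simp only [List.nil_append, List.cons_append]
      rw [pvPass2_cons, ← hcnt]
      exact ih _ _ _ hinv

-- ===== VERDICT (by name: the statement is the Claim_ definition above) =====
theorem count_shortest_paths_spec : Claim_equal_count_shortest_paths := by
  intro graph s t _ _
  show count_shortest_paths graph s t = count_shortest_paths_alt graph s t
  unfold count_shortest_paths count_shortest_paths_alt
  rw [pvMain graph (pvFuel graph) [s] _ _ (by
    intro x hx
    have : x = s := by simpa using hx
    subst this
    simp [PySem.Dict.get?_insert_self])]
  rfl
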